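-- pv_equiv track=rewrite | github.com/deepakgawade/python-course | binary_search/problem_22.py | allocateMinimumPagesBooks
-- ===== SOURCE A (Python) =====
-- def allocateMinimumPagesBooks(arr,nofStudent):
--
--     n=len(arr)
--     if nofStudent>n:
--         return -1
--     low=max(arr)
--     sumOfPages=0
--     for i in range(n):
--         sumOfPages+=arr[i]
--     high=sumOfPages
--
--     countStudent=0
--     #here we cn use binary search:
--     for pages in range(low,high+1):
--
--         countStudent= countOfStudentWithBooks(arr, pages)
--
--         if countStudent==nofStudent:
--             return pages
--
-- def countOfStudentWithBooks(arr, pages):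
--     n=len(arr)
--     student=1
--     pagesStudent=0
--     for i in range(n):
--
--         if arr[i]+pagesStudent<=pages:
--
--             pagesStudent+=arr[i]
--
--         else:
--             student+=1
--             pagesStudent=arr[i]
--
--     return student
-- ===== SOURCE B (Python) =====
-- def allocateMinimumPagesBooks(arr, nofStudent):
--     n = len(arr)
--     if nofStudent > n:
--         return -1
--     low = max(arr)
--     high = sum(arr)
--     # The greedy student count is constant between consecutive comparison values,
--     # so after checking one page limit we can jump straight to the next limit at
--     # which any greedy decision can change (the smallest comparison value above it).
--     pages = low
--     while pages <= high:
--         student, nxt = countAndNextBreak(arr, pages)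
--         if student == nofStudent:
--             return pages
--         if nxt is None:
--             return None
--         pages = nxt
--     return None
--
-- def countAndNextBreak(arr, pages):
--     student = 1
--     loaded = 0
--     nxt = None
--     for a in arr:
--         v = a + loaded
--         if v <= pages:
--             loaded = v
--         else:
--             student += 1
--             loaded = a
--             if nxt is None or v < nxt:
--                 nxt = v
--     return student, nxt
-- ===== Notes on version B (the rewrite author's own statement) =====
-- stated objective: alternative
-- what changed: Instead of testing every integer page limit from max(arr) to sum(arr) one by one, B jumps from each tested limit directly to the next limit at which a greedy decision can change (the smallest comparison value above the current limit, computed in the same pass as the count), so it visits only breakpoints of the count function; it trades A's fixed step-by-one scan for a jump scan that never takes more scan steps than A.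
-- outside the precondition, e.g. on allocateMinimumPagesBooks([], 0): A raises ValueError, B raises ValueError
import Mathlib
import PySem

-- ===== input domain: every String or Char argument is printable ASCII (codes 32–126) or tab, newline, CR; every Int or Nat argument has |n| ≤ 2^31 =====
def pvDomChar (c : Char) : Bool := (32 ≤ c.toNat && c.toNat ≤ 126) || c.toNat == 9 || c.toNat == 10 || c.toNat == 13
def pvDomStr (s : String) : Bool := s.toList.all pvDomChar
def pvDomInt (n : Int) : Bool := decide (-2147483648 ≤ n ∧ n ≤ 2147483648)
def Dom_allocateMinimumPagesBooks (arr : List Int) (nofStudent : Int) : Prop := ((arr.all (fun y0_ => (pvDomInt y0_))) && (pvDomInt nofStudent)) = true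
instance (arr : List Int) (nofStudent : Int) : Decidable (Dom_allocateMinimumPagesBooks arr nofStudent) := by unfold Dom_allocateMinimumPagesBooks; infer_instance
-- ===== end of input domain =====

-- B replaces A's step-by-one scan over the page values in [max, sum] by a jump scan
-- that moves directly to the next page limit at which a greedy decision can change
-- (objective: alternative algorithm, visiting only breakpoints of the count).

-- ===== PORT A =====

-- A's helper: greedy count of students, with the Python index loop (for i in range(n))
def countOfStudentWithBooks (arr : List Int) (pages : Int) : Int :=
  let n : Int := PySem.List.len arr
  ((PySem.List.pyRange 0 n 1).foldl
    (fun (st : Int × Int) i =>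
      if PySem.List.pyGetD arr i 0 + st.2 ≤ pages then (st.1, st.2 + PySem.List.pyGetD arr i 0)
      else (st.1 + 1, PySem.List.pyGetD arr i 0)) (1, 0)).1

-- A's scan: for pages in range(low, high+1): if count == nofStudent: return pages
def allocScanA (arr : List Int) (nofStudent : Int) : List Int → Option Int
  | [] => none
  | pages :: rest =>
    if countOfStudentWithBooks arr pages = nofStudent then some pages
    else allocScanA arr nofStudent rest

def allocateMinimumPagesBooks (arr : List Int) (nofStudent : Int) : Option Int :=
  let n : Int := PySem.List.len arr
  if nofStudent > n then some (-1)
  else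
    match PySem.List.max? arr (fun x => x) with
    | none => none  -- max([]) raises ValueError in Python; excluded by Pre_
    | some low =>
      let sumOfPages : Int :=
        (PySem.List.pyRange 0 n 1).foldl (fun acc i => acc + PySem.List.pyGetD arr i 0) 0
      let high := sumOfPages
      allocScanA arr nofStudent (PySem.List.pyRange low (high + 1) 1)

-- ===== PORT B =====

-- B's inner-loop body: advance the greedy state and keep the smallest comparison
-- value above the current page limit (Source B: if nxt is None or v < nxt: nxt = v)
def pvStep3 (pages : Int) (st : Int × Int × Option Int) (a : Int) : Int × Int × Option Int :=
  let v := a + st.2.1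
  if v ≤ pages then (st.1, v, st.2.2)
  else (st.1 + 1, a, match st.2.2 with
    | none => some v
    | some w => some (min w v))

-- Source B's countAndNextBreak
def countAndNextBreak (arr : List Int) (pages : Int) : Int × Option Int :=
  let st := arr.foldl (pvStep3 pages) (1, 0, none)
  (st.1, st.2.2)

-- termination fact for B's while loop: the next break is above the current limit
lemma nxt_gt_aux (p : Int) : ∀ (l : List Int) (s ps : Int) (m : Option Int),
    (∀ w, m = some w → p < w) →
    ∀ q, (l.foldl (pvStep3 p) (s, ps, m)).2.2 = some q → p < q := by
  intro l
  induction l with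
  | nil => intro s ps m hm q hq; exact hm q hq
  | cons a l ih =>
    intro s ps m hm q hq
    simp only [List.foldl_cons, pvStep3] at hq
    by_cases hc : a + ps ≤ p
    · rw [if_pos hc] at hq
      exact ih _ _ m hm q hq
    · rw [if_neg hc] at hq
      refine ih _ _ _ ?_ q hq
      intro w hw
      cases m with
      | none => simp at hw; omega
      | some w0 =>
        have := hm w0 rfl
        simp at hw
        omega

lemma nxt_gt (arr : List Int) (p q : Int) :
    (countAndNextBreak arr p).2 = some q → p < q := by
  intro h
  exact nxt_gt_aux p arr 1 0 none (by simp) q h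

-- Source B's while loop: pages starts at low and jumps to the next break value
def bWhile (arr : List Int) (nofStudent : Int) (high : Int) (pages : Int) : Option Int :=
  if _h : pages ≤ high then
    let sn := countAndNextBreak arr pages
    if sn.1 = nofStudent then some pages
    else
      match hn : sn.2 with
      | none => none
      | some nxt => bWhile arr nofStudent high nxt
  else none
termination_by (high + 1 - pages).toNat
decreasing_by
  have := nxt_gt arr pages nxt hn
  omega

def allocateMinimumPagesBooks_alt (arr : List Int) (nofStudent : Int) : Option Int :=
  let n : Int := PySem.List.len arr
  if nofStudent > n then some (-1)
  else
    match PySem.List.max? arr (fun x => x) with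
    | none => none  -- max([]) raises ValueError in Python; excluded by Pre_
    | some low =>
      let high : Int := arr.foldl (· + ·) 0
      bWhile arr nofStudent high low

-- ===== PRECONDITION & SPEC =====
-- Pre_ excludes exactly the inputs where Python A raises: arr = [] with nofStudent ≤ 0
-- reaches max([]) (ValueError) in both A and B.
def Pre_allocateMinimumPagesBooks (arr : List Int) (nofStudent : Int) : Prop :=
  arr ≠ [] ∨ 0 < nofStudent
instance (arr : List Int) (nofStudent : Int) : Decidable (Pre_allocateMinimumPagesBooks arr nofStudent) := by
  unfold Pre_allocateMinimumPagesBooks; infer_instance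

def pvWitness_allocateMinimumPagesBooks : List Int × Int := ([12, 34, 67, 90], 2)

def Spec_allocateMinimumPagesBooks (arr : List Int) (nofStudent : Int) (out : Option Int) : Prop := out = allocateMinimumPagesBooks_alt arr nofStudent
instance (arr : List Int) (nofStudent : Int) (out : Option Int) : Decidable (Spec_allocateMinimumPagesBooks arr nofStudent out) := by unfold Spec_allocateMinimumPagesBooks; infer_instance

-- ===== CLAIM (what is proved, stated in full; the proofs are below) =====
def Claim_equal_allocateMinimumPagesBooks : Prop := ∀ (arr : List Int) (nofStudent : Int), Dom_allocateMinimumPagesBooks arr nofStudent → Pre_allocateMinimumPagesBooks arr nofStudent → Spec_allocateMinimumPagesBooks arr nofStudent (allocateMinimumPagesBooks arr nofStudent)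

-- ===== LEMMAS AND PROOFS =====

-- the greedy step on the (student, loaded) state alone
def pvStep (pages : Int) (st : Int × Int) (a : Int) : Int × Int :=
  if a + st.2 ≤ pages then (st.1, st.2 + a) else (st.1 + 1, a)

-- A's index-loop count is the plain fold of pvStep
lemma countA_eq_fold (arr : List Int) (pages : Int) :
    countOfStudentWithBooks arr pages = (arr.foldl (pvStep pages) (1, 0)).1 := by
  have h := PySem.List.foldl_pyRange_zero_pyGetD arr 0 (pvStep pages) ((1 : Int), (0 : Int))
  simp only [pvStep] at h
  simpa [countOfStudentWithBooks, pvStep] using congrArg Prod.fst h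

-- B's triple fold projects onto the pvStep fold
lemma fold3_proj (pages : Int) : ∀ (l : List Int) (s ps : Int) (m : Option Int),
    ((l.foldl (pvStep3 pages) (s, ps, m)).1, (l.foldl (pvStep3 pages) (s, ps, m)).2.1)
      = l.foldl (pvStep pages) (s, ps) := by
  intro l
  induction l with
  | nil => intro s ps m; rfl
  | cons a l ih =>
    intro s ps m
    simp only [List.foldl_cons, pvStep3, pvStep]
    by_cases hc : a + ps ≤ pages
    · rw [if_pos hc, if_pos hc]
      have := ih s (a + ps) m
      rw [show ps + a = a + ps from by ring]
      exact this
    · rw [if_neg hc, if_neg hc]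
      exact ih (s + 1) a _

lemma countB_eq_fold (arr : List Int) (pages : Int) :
    (countAndNextBreak arr pages).1 = (arr.foldl (pvStep pages) (1, 0)).1 := by
  have := congrArg Prod.fst (fold3_proj pages arr 1 0 none)
  simpa [countAndNextBreak] using this

-- the comparison values that exceed the limit p along the greedy run
def candList (p : Int) : Int → List Int → List Int
  | _, [] => []
  | ps, a :: l => if a + ps ≤ p then candList p (a + ps) l else (a + ps) :: candList p a l

-- raising the limit past no such value leaves the whole greedy run unchanged
lemma fold_congr_cand (p q : Int) (hpq : p ≤ q) : ∀ (l : List Int) (s ps : Int),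
    (∀ v ∈ candList p ps l, q < v) →
    l.foldl (pvStep p) (s, ps) = l.foldl (pvStep q) (s, ps) := by
  intro l
  induction l with
  | nil => intro s ps _; rfl
  | cons a l ih =>
    intro s ps h
    simp only [List.foldl_cons, pvStep]
    by_cases hc : a + ps ≤ p
    · rw [if_pos hc, if_pos (le_trans hc hpq)]
      have h' : ∀ v ∈ candList p (a + ps) l, q < v := by
        intro v hv; exact h v (by simp [candList, if_pos hc, hv])
      have := ih s (ps + a) ?_
      · exact this
      · rw [show ps + a = a + ps from by ring]; exact h'
    · have hav : q < a + ps := h (a + ps) (by simp [candList, if_neg hc])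
      rw [if_neg hc, if_neg (by omega)]
      refine ih (s + 1) a ?_
      intro v hv; exact h v (by simp [candList, if_neg hc, hv])

-- the reported break value is a lower bound on every candidate
lemma nxt_le_aux (p : Int) : ∀ (l : List Int) (s ps : Int) (m : Option Int) (q : Int),
    (l.foldl (pvStep3 p) (s, ps, m)).2.2 = some q →
    (∀ w, m = some w → q ≤ w) ∧ ∀ v ∈ candList p ps l, q ≤ v := by
  intro l
  induction l with
  | nil =>
    intro s ps m q hq
    refine ⟨?_, by simp [candList]⟩
    intro w hw; simp only [List.foldl_nil] at hq; rw [hw] at hq; simp at hq; omega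
  | cons a l ih =>
    intro s ps m q hq
    simp only [List.foldl_cons, pvStep3] at hq
    by_cases hc : a + ps ≤ p
    · rw [if_pos hc] at hq
      obtain ⟨h1, h2⟩ := ih _ _ m q hq
      exact ⟨h1, by simp only [candList, if_pos hc]; exact h2⟩
    · rw [if_neg hc] at hq
      obtain ⟨h1, h2⟩ := ih _ _ _ q hq
      have hqv : q ≤ a + ps ∧ ∀ w, m = some w → q ≤ w := by
        cases m with
        | none => exact ⟨h1 (a + ps) rfl, by simp⟩
        | some w0 =>
          have := h1 (min w0 (a + ps)) rfl
          constructor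
          · omega
          · intro w hw
            have hw0 : w = w0 := by simpa using hw.symm
            omega
      refine ⟨hqv.2, ?_⟩
      simp only [candList, if_neg hc, List.mem_cons]
      rintro v (rfl | hv)
      · exact hqv.1
      · exact h2 v hv

-- a break value, once present, never disappears
lemma nxt_some_stays (p : Int) : ∀ (l : List Int) (s ps w : Int),
    (l.foldl (pvStep3 p) (s, ps, some w)).2.2 ≠ none := by
  intro l
  induction l with
  | nil => intro s ps w h; simp at h
  | cons a l ih =>
    intro s ps w h
    simp only [List.foldl_cons, pvStep3] at h
    by_cases hc : a + ps ≤ p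
    · rw [if_pos hc] at h; exact ih _ _ w h
    · rw [if_neg hc] at h; exact ih _ _ _ h

-- no break value means no candidate at all
lemma nxt_none_aux (p : Int) : ∀ (l : List Int) (s ps : Int),
    (l.foldl (pvStep3 p) (s, ps, none)).2.2 = none → candList p ps l = [] := by
  intro l
  induction l with
  | nil => intro s ps _; rfl
  | cons a l ih =>
    intro s ps h
    simp only [List.foldl_cons, pvStep3] at h
    by_cases hc : a + ps ≤ p
    · rw [if_pos hc] at h
      simp only [candList, if_pos hc]
      exact ih _ _ h
    · rw [if_neg hc] at h
      exact absurd h (nxt_some_stays p l _ _ _)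

-- count is constant strictly below the break value (and everywhere if there is none)
lemma count_const_of_some (arr : List Int) (p q r : Int)
    (hq : (countAndNextBreak arr p).2 = some q) (hpr : p ≤ r) (hrq : r < q) :
    (arr.foldl (pvStep r) (1, 0)).1 = (arr.foldl (pvStep p) (1, 0)).1 := by
  have hle := (nxt_le_aux p arr 1 0 none q hq).2
  exact (congrArg Prod.fst (fold_congr_cand p r hpr arr 1 0 (fun v hv => lt_of_lt_of_le hrq (hle v hv)))).symm

lemma count_const_of_none (arr : List Int) (p r : Int)
    (hq : (countAndNextBreak arr p).2 = none) (hpr : p ≤ r) :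
    (arr.foldl (pvStep r) (1, 0)).1 = (arr.foldl (pvStep p) (1, 0)).1 := by
  have hnil := nxt_none_aux p arr 1 0 hq
  exact (congrArg Prod.fst (fold_congr_cand p r hpr arr 1 0 (fun v hv => by rw [hnil] at hv; simp at hv))).symm

-- A's scan in terms of the fold count; returns none iff nothing in the list matches
lemma scanA_none_iff (arr : List Int) (k : Int) (l : List Int) :
    allocScanA arr k l = none ↔ ∀ x ∈ l, countOfStudentWithBooks arr x ≠ k := by
  induction l with
  | nil => simp [allocScanA]
  | cons p r ih =>
    simp only [allocScanA]
    by_cases hp : countOfStudentWithBooks arr p = k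
    · rw [if_pos hp]; simp [hp]
    · rw [if_neg hp]; rw [ih]; simp [hp]

lemma scanA_append (arr : List Int) (k : Int) (l1 l2 : List Int) :
    allocScanA arr k (l1 ++ l2) =
      (match allocScanA arr k l1 with
        | some x => some x
        | none => allocScanA arr k l2) := by
  induction l1 with
  | nil => simp [allocScanA]
  | cons p r ih =>
    simp only [List.cons_append, allocScanA]
    by_cases hp : countOfStudentWithBooks arr p = k
    · rw [if_pos hp, if_pos hp]
    · rw [if_neg hp, if_neg hp, ih]

-- the central invariant: A's remaining linear scan equals B's remaining jump scan
lemma while_eq (arr : List Int) (k high : Int) : ∀ (fuel : Nat) (pages : Int),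
    (high + 1 - pages).toNat ≤ fuel →
    allocScanA arr k (PySem.List.pyRange pages (high + 1) 1) = bWhile arr k high pages := by
  intro fuel
  induction fuel with
  | zero =>
    intro pages hf
    have hph : ¬ pages ≤ high := by omega
    rw [bWhile, dif_neg hph, PySem.List.pyRange_one_eq_nil (by omega)]
    rfl
  | succ fuel ih =>
    intro pages hf
    by_cases hph : pages ≤ high
    · rw [bWhile, dif_pos hph, PySem.List.pyRange_one_cons (by omega)]
      have hcnt : countOfStudentWithBooks arr pages = (countAndNextBreak arr pages).1 := by
        rw [countA_eq_fold, countB_eq_fold]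
      simp only [allocScanA]
      by_cases hk : countOfStudentWithBooks arr pages = k
      · rw [if_pos hk, if_pos (by rw [← hcnt]; exact hk)]
      · rw [if_neg hk, if_neg (by rw [← hcnt]; exact hk)]
        cases hn : (countAndNextBreak arr pages).2 with
        | none =>
          rw [scanA_none_iff]
          intro x hx
          have hm := PySem.List.mem_pyRange_one.mp hx
          have : countOfStudentWithBooks arr x = countOfStudentWithBooks arr pages := by
            rw [countA_eq_fold, countA_eq_fold]
            exact count_const_of_none arr pages x hn (by omega)
          rw [this]; exact hk
        | some q =>
          have hpq : pages < q := nxt_gt arr pages q hn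
          have hsplit : PySem.List.pyRange (pages + 1) (high + 1) 1 =
              PySem.List.pyRange (pages + 1) (min q (high + 1)) 1 ++
                PySem.List.pyRange (min q (high + 1)) (high + 1) 1 :=
            PySem.List.pyRange_one_append _ _ _ (by omega) (by omega)
          rw [hsplit, scanA_append]
          have hfirst : allocScanA arr k (PySem.List.pyRange (pages + 1) (min q (high + 1)) 1) = none := by
            rw [scanA_none_iff]
            intro x hx
            have hm := PySem.List.mem_pyRange_one.mp hx
            have : countOfStudentWithBooks arr x = countOfStudentWithBooks arr pages := by
              rw [countA_eq_fold, countA_eq_fold]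
              exact count_const_of_some arr pages q x hn (by omega) (by omega)
            rw [this]; exact hk
          rw [hfirst]
          have hsecond : PySem.List.pyRange (min q (high + 1)) (high + 1) 1 =
              PySem.List.pyRange q (high + 1) 1 := by
            by_cases hq : q ≤ high + 1
            · rw [min_eq_left hq]
            · rw [min_eq_right (by omega), PySem.List.pyRange_one_eq_nil (by omega),
                PySem.List.pyRange_one_eq_nil (by omega)]
          rw [hsecond]
          exact ih q (by omega)
    · rw [bWhile, dif_neg hph, PySem.List.pyRange_one_eq_nil (by omega)]
      rfl

-- ===== VERDICT (by name: the statement is the Claim_ definition above) =====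
theorem allocateMinimumPagesBooks_spec : Claim_equal_allocateMinimumPagesBooks := by
  intro arr k _ _
  unfold Spec_allocateMinimumPagesBooks
  unfold allocateMinimumPagesBooks allocateMinimumPagesBooks_alt
  by_cases hk : k > PySem.List.len arr
  · simp only [if_pos hk]
  · simp only [if_neg hk]
    cases hmax : PySem.List.max? arr (fun x => x) with
    | none => rfl
    | some low =>
      dsimp only
      have hsum : (PySem.List.pyRange 0 (PySem.List.len arr) 1).foldl
          (fun acc i => acc + PySem.List.pyGetD arr i 0) 0 = arr.foldl (· + ·) 0 :=
        PySem.List.foldl_pyRange_zero_pyGetD arr 0 (· + ·) 0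
      rw [hsum]
      exact while_eq arr k (arr.foldl (· + ·) 0) (arr.foldl (· + ·) 0 + 1 - low).toNat low le_rfl
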